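-- pv_equiv track=rewrite | github.com/PNaharro/Dam1 | Uf2_naharro/uso_rapido/usos.py | funcion3
-- ===== SOURCE A (Python) =====
-- def funcion3(frase):
--     vocales = 'aeiou'
--     resultado = ''
--     if len(frase) != 0:
--        if frase[0].lower() in vocales:
--            resultado = frase[0].lower() + funcion3(frase[1:])
--        else:
--            resultado = frase[0].upper() + funcion3(frase[1:])
--     return resultado
-- ===== SOURCE B (Python) =====
-- def funcion3(frase):
--     resultado = frase.upper()
--     for v in 'AEIOU':
--         resultado = resultado.replace(v, v.lower())
--     return resultado
-- ===== Notes on version B (the rewrite author's own statement) =====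
-- stated objective: faster
-- what changed: Replaced A's recursion that rebuilds the tail by slicing at every step with whole-string passes: uppercase everything once, then one replace per vowel to lowercase the vowels.
import Mathlib
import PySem

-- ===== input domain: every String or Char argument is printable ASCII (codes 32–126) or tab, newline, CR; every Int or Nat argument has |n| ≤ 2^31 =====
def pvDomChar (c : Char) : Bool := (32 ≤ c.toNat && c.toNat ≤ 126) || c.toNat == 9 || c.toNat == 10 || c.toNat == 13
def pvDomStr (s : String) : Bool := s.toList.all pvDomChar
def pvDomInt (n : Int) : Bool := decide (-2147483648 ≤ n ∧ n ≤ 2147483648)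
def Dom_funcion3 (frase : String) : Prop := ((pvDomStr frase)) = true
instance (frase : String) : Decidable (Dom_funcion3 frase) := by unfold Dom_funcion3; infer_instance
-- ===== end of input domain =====

-- B: uppercase the whole string once, then one replace pass per vowel — whole-string staged passes
-- instead of A's per-character recursion that re-slices the tail (objective: faster, asymptotic).

-- ===== PORT A =====
-- A recurses: first char lowered if its lowercase form is a vowel else uppered, prepended to funcion3 of the tail.
def funcion3Rec : List Char → List Char
  | [] => []
  | c :: rest =>
    if PySem.Chars.isIn [PySem.Chars.lowerChar c] ['a','e','i','o','u'] then
      PySem.Chars.lowerChar c :: funcion3Rec rest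
    else
      PySem.Chars.upperChar c :: funcion3Rec rest

def funcion3 (frase : String) : String := String.mk (funcion3Rec frase.toList)

-- ===== PORT B =====
-- resultado = frase.upper(); for v in 'AEIOU': resultado = resultado.replace(v, v.lower())
def funcion3_alt (frase : String) : String :=
  String.mk
    (['A','E','I','O','U'].foldl
      (fun resultado v => PySem.Chars.replace resultado [v] [PySem.Chars.lowerChar v])
      (PySem.Chars.upper frase.toList))

-- ===== PRECONDITION & SPEC =====
def Spec_funcion3 (frase : String) (out : String) : Prop := out = funcion3_alt frase
instance (frase : String) (out : String) : Decidable (Spec_funcion3 frase out) := by unfold Spec_funcion3; infer_instance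

-- ===== CLAIM =====
def Claim_equal_funcion3 : Prop := ∀ (frase : String), Dom_funcion3 frase → Spec_funcion3 frase (funcion3 frase)

-- ===== LEMMAS AND PROOFS =====

-- replace with a single-character pattern is a pointwise map
theorem replace_go_single (V v : Char) (l acc : List Char) :
    PySem.Chars.replace.go [V] [v] l.length l acc
      = acc.reverse ++ l.map (fun c => if c = V then v else c) := by
  induction l generalizing acc with
  | nil => simp [PySem.Chars.replace.go]
  | cons c t ih =>
    by_cases h : V = c
    · subst h
      simp [PySem.Chars.replace.go, List.isPrefixOf, ih]
    · simp [PySem.Chars.replace.go, List.isPrefixOf, h, Ne.symm h, ih]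

theorem replace_single (V v : Char) (l : List Char) :
    PySem.Chars.replace l [V] [v] = l.map (fun c => if c = V then v else c) := by
  have := replace_go_single V v l []
  simpa [PySem.Chars.replace] using this

-- the per-character effect of B's staged passes
def bChar (c : Char) : Char :=
  ['A','E','I','O','U'].foldl
    (fun x v => if x = v then PySem.Chars.lowerChar v else x)
    (PySem.Chars.upperChar c)

-- the per-character effect of A's branch
def aChar (c : Char) : Char :=
  if PySem.Chars.isIn [PySem.Chars.lowerChar c] ['a','e','i','o','u'] then
    PySem.Chars.lowerChar c
  else
    PySem.Chars.upperChar c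

theorem aChar_eq_bChar_small : ∀ n < 128, aChar (Char.ofNat n) = bChar (Char.ofNat n) := by
  decide

theorem aChar_eq_bChar (c : Char) (hc : pvDomChar c = true) : aChar c = bChar c := by
  have h : c.toNat < 128 := by
    simp [pvDomChar] at hc
    omega
  have := aChar_eq_bChar_small c.toNat h
  rwa [Char.ofNat_toNat] at this

theorem funcion3Rec_eq_map (l : List Char) : funcion3Rec l = l.map aChar := by
  induction l with
  | nil => rfl
  | cons c rest ih =>
    simp only [funcion3Rec, aChar, List.map_cons, ih]
    split_ifs <;> rfl

-- ===== VERDICT =====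
theorem funcion3_spec : Claim_equal_funcion3 := by
  intro frase hdom
  unfold Spec_funcion3 funcion3 funcion3_alt
  rw [funcion3Rec_eq_map]
  simp only [List.foldl_cons, List.foldl_nil, PySem.Chars.upper, replace_single, List.map_map]
  refine congrArg String.mk (List.map_congr_left ?_)
  intro c hcmem
  have hc : pvDomChar c = true := by
    have := hdom
    unfold Dom_funcion3 pvDomStr at this
    exact List.all_eq_true.mp this c hcmem
  rw [aChar_eq_bChar c hc]
  simp [bChar]
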